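-- pv_equiv track=rewrite | github.com/RenissonSilva/coral-island-ws | script.py | set_join
-- ===== SOURCE A (Python) =====
-- from typing import List, Optional, Set, Tuple
--
-- def set_join(values: Set[str]) -> str:
--     if not values:
--         return ""
--     # Keep a stable order: seasons in canonical order if possible, else alpha
--     canon = ["Spring", "Summer", "Fall", "Winter", "All Seasons", "Year Round"]
--     present = {v.lower(): v for v in values}
--     ordered = [present.get(c.lower()) for c in canon if c.lower() in present]
--     rest = sorted([v for k, v in present.items() if k not in {c.lower() for c in canon}])
--     return "; ".join([v for v in ordered if v] + rest)
-- ===== SOURCE B (Python) =====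
-- def set_join(values):
--     if not values:
--         return ""
--     canon = ["Spring", "Summer", "Fall", "Winter", "All Seasons", "Year Round"]
--     canon_lower = [c.lower() for c in canon]
--     present = {v.lower(): v for v in values}
--
--     def key(v):
--         lv = v.lower()
--         if lv in canon_lower:
--             return (canon_lower.index(lv), "")
--         return (len(canon), v)
--
--     return "; ".join(sorted(present.values(), key=key))
-- ===== Notes on version B (the rewrite author's own statement) =====
-- stated objective: simpler
-- what changed: Replaces A's two-phase partition (canonical scan producing 'ordered' plus a separate filtered-and-sorted 'rest', concatenated) with a single sorted() over the deduplicated values using one priority key: (canon index, "") for canonical seasons, (len(canon), value) for the rest.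
import Mathlib
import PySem

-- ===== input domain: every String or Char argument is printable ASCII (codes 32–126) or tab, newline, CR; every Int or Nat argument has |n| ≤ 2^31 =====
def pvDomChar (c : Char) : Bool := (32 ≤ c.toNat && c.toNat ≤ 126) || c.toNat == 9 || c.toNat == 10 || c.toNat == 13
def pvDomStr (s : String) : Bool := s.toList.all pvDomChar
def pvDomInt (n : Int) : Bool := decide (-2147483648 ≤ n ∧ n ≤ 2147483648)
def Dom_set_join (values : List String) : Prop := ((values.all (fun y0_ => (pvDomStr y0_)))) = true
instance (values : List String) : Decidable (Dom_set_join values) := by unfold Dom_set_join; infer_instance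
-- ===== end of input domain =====

-- B replaces A's two-phase partition (canonical scan + separately sorted rest, concatenated)
-- by a single keyed sort of the deduplicated values; objective: simpler.

-- ===== PORT A =====
def set_join (values : List String) : String :=
  if values = [] then "" else
    let canon : List String := ["Spring", "Summer", "Fall", "Winter", "All Seasons", "Year Round"]
    let present : PySem.Dict String String :=
      values.foldl (fun d v => d.insert (PySem.Str.lower v) v) PySem.Dict.empty
    let ordered : List (Option String) :=
      (canon.filter (fun c => present.contains (PySem.Str.lower c))).map
        (fun c => present.get? (PySem.Str.lower c))
    let canonSet : PySem.Set String := PySem.Set.ofList (canon.map (fun c => PySem.Str.lower c))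
    let rest : List String :=
      PySem.List.sorted
        ((present.items.filter (fun kv => !(canonSet.contains kv.1))).map (fun kv => kv.2))
        (fun v => v)
    PySem.Str.join "; "
      ((ordered.filterMap (fun o => match o with
          | some v => if v = "" then none else some v
          | none => none)) ++ rest)

-- ===== PORT B =====
def set_join_alt (values : List String) : String :=
  if values = [] then "" else
    let canonB : List String := ["Spring", "Summer", "Fall", "Winter", "All Seasons", "Year Round"]
    let canonLower : List String := canonB.map (fun c => PySem.Str.lower c)
    let presentB : PySem.Dict String String :=
      values.foldl (fun d v => d.insert (PySem.Str.lower v) v) PySem.Dict.empty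
    let key : String → ℕ ×ₗ String := fun v =>
      if canonLower.contains (PySem.Str.lower v) then
        toLex ((PySem.List.index? canonLower (PySem.Str.lower v)).getD 0, "")
      else toLex (canonB.length, v)
    PySem.Str.join "; " (PySem.List.sorted presentB.values key)

-- ===== PRECONDITION & SPEC =====
def Spec_set_join (values : List String) (out : String) : Prop := out = set_join_alt values
instance (values : List String) (out : String) : Decidable (Spec_set_join values out) := by unfold Spec_set_join; infer_instance

-- ===== CLAIM (what is proved, stated in full; the proofs are below) =====
def Claim_equal_set_join : Prop := ∀ (values : List String), Dom_set_join values → Spec_set_join values (set_join values)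

-- ===== LEMMAS AND PROOFS =====

def pvCanon : List String := ["Spring", "Summer", "Fall", "Winter", "All Seasons", "Year Round"]
def pvCanonLower : List String := pvCanon.map (fun c => PySem.Str.lower c)
def pvKey : String → ℕ ×ₗ String := fun v =>
  if pvCanonLower.contains (PySem.Str.lower v) then
    toLex ((PySem.List.index? pvCanonLower (PySem.Str.lower v)).getD 0, "")
  else toLex (pvCanon.length, v)


lemma pv_filterMap_eq_map {α β γ : Type} (l : List α) (f : β → Option γ) (g : α → β) (h : α → γ)
    (H : ∀ c ∈ l, f (g c) = some (h c)) : (l.map g).filterMap f = l.map h := by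
  induction l with
  | nil => rfl
  | cons a t ih =>
    simp only [List.map_cons, List.filterMap_cons, H a (by simp)]
    rw [ih (fun c hc => H c (by simp [hc]))]

lemma pv_inv_lower (values : List String) (d : PySem.Dict String String)
    (h : ∀ kv ∈ d.items, kv.1 = PySem.Str.lower kv.2) :
    ∀ kv ∈ (values.foldl (fun d v => d.insert (PySem.Str.lower v) v) d).items,
      kv.1 = PySem.Str.lower kv.2 := by
  induction values generalizing d with
  | nil => exact h
  | cons v t ih =>
    refine ih _ ?_
    intro kv hkv
    rcases (PySem.Dict.mem_items_insert _ _ _ _).1 hkv with h1 | h2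
    · subst h1; rfl
    · exact h kv h2.1

lemma pv_core (d : PySem.Dict String String)
    (HK : d.keys.Nodup)
    (HV : ∀ kv ∈ d.items, kv.1 = PySem.Str.lower kv.2) :
    PySem.List.sorted d.values pvKey =
      ((pvCanon.filter (fun c => d.contains (PySem.Str.lower c))).map
          (fun c => d.get? (PySem.Str.lower c))).filterMap (fun o => match o with
            | some v => if v = "" then none else some v
            | none => none)
      ++ PySem.List.sorted
          ((d.items.filter (fun kv => !(pvCanonLower.contains kv.1))).map (fun kv => kv.2))
          (fun v => v) := by
  classical
  set F := pvCanon.filter (fun c => d.contains (PySem.Str.lower c)) with hF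
  set h : String → String := fun c => d.getD (PySem.Str.lower c) "" with hh
  -- per-element facts on F
  have hget : ∀ c ∈ F, d.get? (PySem.Str.lower c) = some (h c) := by
    intro c hc
    have hcont : d.contains (PySem.Str.lower c) = true := (List.mem_filter.1 hc).2
    rcases hv : d.get? (PySem.Str.lower c) with _ | v
    · exfalso
      have := (PySem.Dict.get?_eq_none_iff_contains d (PySem.Str.lower c)).1 hv
      simp [hcont] at this
    · simp [hh, PySem.Dict.getD_eq_get?_getD, hv]
  have hmemitems : ∀ c ∈ F, (PySem.Str.lower c, h c) ∈ d.items := by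
    intro c hc
    exact (PySem.Dict.get?_eq_some_iff_mem_items d _ _ HK).1 (hget c hc)
  have hlow : ∀ c ∈ F, PySem.Str.lower (h c) = PySem.Str.lower c := by
    intro c hc
    exact (HV _ (hmemitems c hc)).symm
  have hlowmem : ∀ c ∈ F, PySem.Str.lower c ∈ pvCanonLower := by
    intro c hc
    have : c ∈ pvCanon := (List.mem_filter.1 hc).1
    exact List.mem_map.2 ⟨c, this, rfl⟩
  have hne : ∀ c ∈ F, h c ≠ "" := by
    intro c hc he
    have h1 := hlow c hc
    rw [he] at h1
    have h2 := hlowmem c hc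
    rw [← h1] at h2
    exact absurd h2 (by decide)
  -- the ordered part is F.map h
  have hOmap : (F.map (fun c => d.get? (PySem.Str.lower c))).filterMap (fun o => match o with
      | some v => if v = "" then none else some v
      | none => none) = F.map h := by
    refine pv_filterMap_eq_map F _ _ h ?_
    intro c hc
    rw [hget c hc]
    simp [hne c hc]
  rw [hOmap]
  -- the two item partitions
  set IC := d.items.filter (fun kv => pvCanonLower.contains kv.1) with hIC
  set IR := d.items.filter (fun kv => !(pvCanonLower.contains kv.1)) with hIR
  -- nodup of item second components
  have hitemsnd : ∀ l : List (String × String), l.Sublist d.items → (l.map (fun kv => kv.2)).Nodup := by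
    intro l hl
    have hlk : (l.map (fun kv => kv.1)).Nodup := (List.Sublist.map _ hl).nodup HK
    have hlnd : l.Nodup := hlk.of_map
    refine hlnd.map_on ?_
    intro x hx y hy hxy
    have hx1 : x.1 = PySem.Str.lower x.2 := HV x (hl.mem hx)
    have hy1 : y.1 = PySem.Str.lower y.2 := HV y (hl.mem hy)
    have hk1 : x.1 = y.1 := by rw [hx1, hy1, hxy]
    exact List.inj_on_of_nodup_map hlk hx hy hk1
  -- membership characterisations
  have hmemO : ∀ v, v ∈ F.map h ↔ (PySem.Str.lower v ∈ pvCanonLower ∧ (PySem.Str.lower v, v) ∈ d.items) := by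
    intro v
    constructor
    · rintro hv
      rcases List.mem_map.1 hv with ⟨c, hc, rfl⟩
      refine ⟨by rw [hlow c hc]; exact hlowmem c hc, ?_⟩
      rw [hlow c hc]; exact hmemitems c hc
    · rintro ⟨hv1, hv2⟩
      rcases List.mem_map.1 hv1 with ⟨c, hc, hlc⟩
      have hck : d.contains (PySem.Str.lower c) = true := by
        rw [hlc]
        have hk := PySem.Dict.mem_keys_of_mem_items d hv2
        exact (PySem.Dict.contains_iff_mem_keys _ _).2 hk
      have hcF : c ∈ F := List.mem_filter.2 ⟨hc, hck⟩
      refine List.mem_map.2 ⟨c, hcF, ?_⟩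
      show d.getD (PySem.Str.lower c) "" = v
      rw [hlc]
      exact PySem.Dict.getD_of_mem_items _ hv2 HK ""
  have hmemIC : ∀ v, v ∈ IC.map (fun kv => kv.2) ↔ (PySem.Str.lower v ∈ pvCanonLower ∧ (PySem.Str.lower v, v) ∈ d.items) := by
    intro v
    constructor
    · rintro hv
      rcases List.mem_map.1 hv with ⟨kv, hkv, rfl⟩
      rcases List.mem_filter.1 hkv with ⟨hkv1, hkv2⟩
      have hkvl := HV kv hkv1
      refine ⟨?_, ?_⟩
      · rw [← hkvl]; simpa using hkv2
      · rw [← hkvl]; exact hkv1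
    · rintro ⟨hv1, hv2⟩
      exact List.mem_map.2 ⟨(PySem.Str.lower v, v), List.mem_filter.2 ⟨hv2, by simpa using hv1⟩, rfl⟩
  -- permutation of the ordered part
  have hOnodup : (F.map h).Nodup := by
    have hFnd : F.Nodup := (by decide : pvCanon.Nodup).filter _
    refine hFnd.map_on ?_
    intro x hx y hy hxy
    have hlxy : PySem.Str.lower x = PySem.Str.lower y := by
      rw [← hlow x hx, ← hlow y hy, hxy]
    have hcl : pvCanonLower.Nodup := by decide
    exact List.inj_on_of_nodup_map (by exact hcl) (List.mem_filter.1 hx).1 (List.mem_filter.1 hy).1 hlxy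
  have hICnodup : (IC.map (fun kv => kv.2)).Nodup := hitemsnd IC List.filter_sublist
  have hpermO : (F.map h).Perm (IC.map (fun kv => kv.2)) := by
    refine List.perm_of_nodup_nodup_toFinset_eq hOnodup hICnodup ?_
    ext v
    simp only [List.mem_toFinset]
    rw [hmemO v, hmemIC v]
  -- key evaluation
  have hkeyO : ∀ v, PySem.Str.lower v ∈ pvCanonLower →
      pvKey v = toLex ((PySem.List.index? pvCanonLower (PySem.Str.lower v)).getD 0, "") := by
    intro v hv
    unfold pvKey
    rw [if_pos]
    simpa using hv
  have hkeyR : ∀ v, PySem.Str.lower v ∉ pvCanonLower → pvKey v = toLex (6, v) := by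
    intro v hv
    unfold pvKey
    rw [if_neg]
    · rfl
    · simpa using hv
  have hidxlt : ∀ x ∈ pvCanonLower, (PySem.List.index? pvCanonLower x).getD 0 < 6 := by
    intro x hx
    have hs : (PySem.List.index? pvCanonLower x).isSome :=
      (PySem.List.index?_isSome_iff _ _).2 hx
    obtain ⟨k, hk⟩ := Option.isSome_iff_exists.1 hs
    obtain ⟨hklt, -⟩ := PySem.List.getElem_of_index?_eq_some hk
    simp only [hk, Option.getD_some]
    have h6 : pvCanonLower.length = 6 := by decide
    omega
  -- pairwise on the ordered part
  have hpairO : (F.map h).Pairwise (fun a b => pvKey a < pvKey b) := by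
    rw [List.pairwise_map]
    have base : pvCanon.Pairwise (fun c c' =>
        (PySem.List.index? pvCanonLower (PySem.Str.lower c)).getD 0 <
        (PySem.List.index? pvCanonLower (PySem.Str.lower c')).getD 0) := by decide
    have hfil := base.filter (fun c => d.contains (PySem.Str.lower c))
    refine List.Pairwise.imp_of_mem ?_ hfil
    intro a b ha hb hab
    rw [hkeyO (h a) (by rw [hlow a ha]; exact hlowmem a ha),
        hkeyO (h b) (by rw [hlow b hb]; exact hlowmem b hb),
        hlow a ha, hlow b hb]
    exact Prod.Lex.toLex_lt_toLex.2 (Or.inl hab)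
  -- the rest
  set w := IR.map (fun kv => kv.2) with hw
  have hwnotmem : ∀ a ∈ w, PySem.Str.lower a ∉ pvCanonLower := by
    intro a ha
    rcases List.mem_map.1 ha with ⟨kv, hkv, rfl⟩
    rcases List.mem_filter.1 hkv with ⟨hkv1, hkv2⟩
    have hkvl := HV kv hkv1
    rw [← hkvl]
    simpa using hkv2
  have hwnodup : w.Nodup := hitemsnd IR List.filter_sublist
  have hRperm : (PySem.List.sorted w (fun v => v)).Perm w := PySem.List.sorted_perm w _ _
  have hRnodup : (PySem.List.sorted w (fun v => v)).Nodup := hRperm.symm.nodup hwnodup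
  have hle : (PySem.List.sorted w (fun v => v)).Pairwise (fun a b => a ≤ b) :=
    PySem.List.sorted_pairwise w _
  have hpairR : (PySem.List.sorted w (fun v => v)).Pairwise (fun a b => pvKey a < pvKey b) := by
    refine List.Pairwise.imp_of_mem ?_ (hle.and hRnodup)
    intro a b ha hb hab
    have hma : a ∈ w := (PySem.List.mem_sorted w _ _ a).1 ha
    have hmb : b ∈ w := (PySem.List.mem_sorted w _ _ b).1 hb
    rw [hkeyR a (hwnotmem a hma), hkeyR b (hwnotmem b hmb)]
    exact Prod.Lex.toLex_lt_toLex.2 (Or.inr ⟨rfl, lt_of_le_of_ne hab.1 hab.2⟩)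
  -- cross
  have hcross : ∀ a ∈ F.map h, ∀ b ∈ PySem.List.sorted w (fun v => v), pvKey a < pvKey b := by
    intro a ha b hb
    have hal : PySem.Str.lower a ∈ pvCanonLower := ((hmemO a).1 ha).1
    have hmb : b ∈ w := (PySem.List.mem_sorted w _ _ b).1 hb
    rw [hkeyO a hal, hkeyR b (hwnotmem b hmb)]
    exact Prod.Lex.toLex_lt_toLex.2 (Or.inl (hidxlt _ hal))
  -- assemble
  refine PySem.List.sorted_eq_of_perm_of_pairwise_lt _ _ pvKey ?_ ?_
  · have h1 : (F.map h ++ PySem.List.sorted w (fun v => v)).Perm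
        (IC.map (fun kv => kv.2) ++ w) := hpermO.append hRperm
    have h2 : (IC.map (fun kv => kv.2) ++ w).Perm (d.items.map (fun kv => kv.2)) := by
      rw [hw, ← List.map_append]
      exact (List.filter_append_perm _ d.items).map _
    have hv : d.values = d.items.map (fun kv => kv.2) := by
      simp [PySem.Dict.values]
    rw [hv]
    exact h1.trans h2
  · exact List.pairwise_append.2 ⟨hpairO, hpairR, hcross⟩

lemma pv_bridge (values : List String) (hv : values ≠ []) : set_join values = set_join_alt values := by
  unfold set_join set_join_alt
  rw [if_neg hv, if_neg hv]
  dsimp only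
  have HK : ((values.foldl (fun d v => d.insert (PySem.Str.lower v) v) PySem.Dict.empty)).keys.Nodup :=
    PySem.Dict.nodup_keys_foldl_insert_key values PySem.Str.lower (fun _ v => v) PySem.Dict.empty
      (by simp [PySem.Dict.keys_empty])
  have HV : ∀ kv ∈ ((values.foldl (fun d v => d.insert (PySem.Str.lower v) v) PySem.Dict.empty)).items,
      kv.1 = PySem.Str.lower kv.2 :=
    pv_inv_lower values PySem.Dict.empty (by simp [PySem.Dict.empty])
  rw [show PySem.Set.ofList (List.map (fun c => PySem.Str.lower c) ["Spring", "Summer", "Fall", "Winter", "All Seasons", "Year Round"]) = pvCanonLower from by decide]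
  rw [show (["Spring", "Summer", "Fall", "Winter", "All Seasons", "Year Round"] : List String) = pvCanon from rfl]
  rw [show List.map (fun c => PySem.Str.lower c) pvCanon = pvCanonLower from rfl]
  exact congrArg (PySem.Str.join "; ") (pv_core _ HK HV).symm

-- ===== VERDICT (by name: the statement is the Claim_ definition above) =====
theorem set_join_spec : Claim_equal_set_join := by
  intro values _
  unfold Spec_set_join
  by_cases hv : values = []
  · subst hv; rfl
  · exact pv_bridge values hv
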